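-- pv_equiv track=rewrite | github.com/henrycosentino/option_dashboard | helpers.py | day_filter
-- ===== SOURCE A (Python) =====
-- def day_filter(days_ls, iv_ls, start_day, end_day):
--     filtered_days = []
--     start_idx = None
--     end_idx = None
--
--     for i, day in enumerate(days_ls):
--         if day >= start_day:
--             if day <= end_day:
--                 if start_idx is None:
--                     start_idx = i
--                 end_idx = i
--                 filtered_days.append(day)
--
--     if start_idx is not None and end_idx is not None:
--         filtered_iv = iv_ls[start_idx : end_idx + 1]
--     else:
--         filtered_iv = []
--
--     return filtered_days, filtered_iv
-- ===== SOURCE B (Python) =====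
-- def _first_in_range(days_ls, start_day, end_day):
--     for i, d in enumerate(days_ls):
--         if start_day <= d <= end_day:
--             return i
--     return None
--
--
-- def day_filter(days_ls, iv_ls, start_day, end_day):
--     filtered_days = [d for d in days_ls if start_day <= d <= end_day]
--     lo = _first_in_range(days_ls, start_day, end_day)
--     if lo is None:
--         return filtered_days, []
--     hi = len(days_ls) - 1 - _first_in_range(days_ls[::-1], start_day, end_day)
--     return filtered_days, iv_ls[lo:hi + 1]
-- ===== Notes on version B (the rewrite author's own statement) =====
-- stated objective: alternative
-- what changed: A's single stateful loop (accumulator plus mutable start/end index tracking) is replaced by a list comprehension for the filtered days plus two independent first-match searches (forward, and on the reversed list for the last match) to delimit the iv slice.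
import Mathlib
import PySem

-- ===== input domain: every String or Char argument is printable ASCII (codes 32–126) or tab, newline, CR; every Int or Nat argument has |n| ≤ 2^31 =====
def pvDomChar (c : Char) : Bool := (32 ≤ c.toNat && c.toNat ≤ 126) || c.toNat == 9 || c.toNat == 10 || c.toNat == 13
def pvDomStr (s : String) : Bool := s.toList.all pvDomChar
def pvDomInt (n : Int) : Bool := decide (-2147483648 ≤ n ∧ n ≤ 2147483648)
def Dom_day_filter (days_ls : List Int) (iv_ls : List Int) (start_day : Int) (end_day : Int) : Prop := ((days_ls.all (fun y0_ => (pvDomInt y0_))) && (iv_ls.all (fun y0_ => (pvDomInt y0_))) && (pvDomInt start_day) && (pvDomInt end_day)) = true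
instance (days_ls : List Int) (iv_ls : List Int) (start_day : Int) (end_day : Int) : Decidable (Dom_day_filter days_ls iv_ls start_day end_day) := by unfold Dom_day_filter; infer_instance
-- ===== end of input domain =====

-- B replaces A's single stateful loop by a comprehension plus two independent
-- first-match searches (forward, and over the reversed list); alternative, not faster.

-- ===== PORT A =====
-- A's loop: accumulate filtered days, remember first and last matching index.
def day_filter (days_ls : List Int) (iv_ls : List Int) (start_day : Int) (end_day : Int) : List Int × List Int :=
  let st := (PySem.List.enumerate days_ls 0).foldl
    (fun (acc : List Int × Option Int × Option Int) (p : Int × Int) =>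
      if p.2 ≥ start_day then
        if p.2 ≤ end_day then
          (acc.1 ++ [p.2],
           (match acc.2.1 with | none => some p.1 | some s => some s),
           some p.1)
        else acc
      else acc)
    ([], none, none)
  match st.2.1, st.2.2 with
  | some si, some ei => (st.1, PySem.List.slice iv_ls (some si) (some (ei + 1)))
  | _, _ => (st.1, [])

-- ===== PORT B =====
-- Source B's `_first_in_range`: a for-loop over enumerate with an early return.
def firstInRangeAux (start_day end_day : Int) : List (Int × Int) → Option Int
  | [] => none
  | (i, d) :: rest =>
    if start_day ≤ d ∧ d ≤ end_day then some i else firstInRangeAux start_day end_day rest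

def firstInRange (days_ls : List Int) (start_day : Int) (end_day : Int) : Option Int :=
  firstInRangeAux start_day end_day (PySem.List.enumerate days_ls 0)

def day_filter_alt (days_ls : List Int) (iv_ls : List Int) (start_day : Int) (end_day : Int) : List Int × List Int :=
  let filtered_days := days_ls.filter (fun d => decide (start_day ≤ d ∧ d ≤ end_day))
  match firstInRange days_ls start_day end_day with
  | none => (filtered_days, [])
  | some lo =>
    -- days_ls[::-1] is List.reverse (PySem.List.slice?_none_none_neg_one);
    -- .getD 0 is unreachable: a forward match exists, so the reverse search succeeds.
    let hi : Int := (days_ls.length : Int) - 1 -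
      (firstInRange days_ls.reverse start_day end_day).getD 0
    (filtered_days, PySem.List.slice iv_ls (some lo) (some (hi + 1)))

-- ===== PRECONDITION & SPEC =====
def Spec_day_filter (days_ls : List Int) (iv_ls : List Int) (start_day : Int) (end_day : Int) (out : List Int × List Int) : Prop := out = day_filter_alt days_ls iv_ls start_day end_day
instance (days_ls : List Int) (iv_ls : List Int) (start_day : Int) (end_day : Int) (out : List Int × List Int) : Decidable (Spec_day_filter days_ls iv_ls start_day end_day out) := by unfold Spec_day_filter; infer_instance

-- ===== CLAIM (what is proved, stated in full; the proofs are below) =====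
def Claim_equal_day_filter : Prop := ∀ (days_ls : List Int) (iv_ls : List Int) (start_day : Int) (end_day : Int), Dom_day_filter days_ls iv_ls start_day end_day → Spec_day_filter days_ls iv_ls start_day end_day (day_filter days_ls iv_ls start_day end_day)

-- ===== LEMMAS AND PROOFS =====

-- Proof-only: the last matching index of the list, indices starting at n.
def lastIdx (s e : Int) : List Int → Int → Option Int
  | [], _ => none
  | d :: ds, n => (lastIdx s e ds (n + 1)).or (if s ≤ d ∧ d ≤ e then some n else none)

theorem lastIdx_shift (s e : Int) (xs : List Int) (n : Int) :
    lastIdx s e xs n = (lastIdx s e xs 0).map (fun j => n + j) := by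
  induction xs generalizing n with
  | nil => rfl
  | cons d ds ih =>
    simp only [lastIdx, zero_add, ih (n + 1), ih 1]
    cases lastIdx s e ds 0 <;> split_ifs <;> simp <;> ring

theorem firstInRangeAux_append (s e : Int) (l1 l2 : List (Int × Int)) :
    firstInRangeAux s e (l1 ++ l2) = (firstInRangeAux s e l1).or (firstInRangeAux s e l2) := by
  induction l1 with
  | nil => simp [firstInRangeAux]
  | cons p rest ih =>
    obtain ⟨i, d⟩ := p
    simp only [List.cons_append, firstInRangeAux, ih]
    split_ifs <;> simp

theorem firstAux_rev (s e : Int) (xs : List Int) :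
    firstInRangeAux s e (PySem.List.enumerate xs.reverse 0) =
      (lastIdx s e xs 0).map (fun j => (xs.length : Int) - 1 - j) := by
  induction xs with
  | nil => rfl
  | cons d ds ih =>
    rw [List.reverse_cons, PySem.List.enumerate_append, firstInRangeAux_append, ih]
    simp only [lastIdx, zero_add, lastIdx_shift s e ds 1]
    cases h : lastIdx s e ds 0 <;>
        simp [PySem.List.enumerate, firstInRangeAux]
    ring

theorem first_none_iff_last_none (s e : Int) (xs : List Int) (n : Int) :
    firstInRangeAux s e (PySem.List.enumerate xs n) = none ↔ lastIdx s e xs n = none := by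
  induction xs generalizing n with
  | nil => simp [PySem.List.enumerate, firstInRangeAux, lastIdx]
  | cons d ds ih =>
    simp only [PySem.List.enumerate_cons, firstInRangeAux, lastIdx, Option.or_eq_none_iff]
    split_ifs with h
    · simp
    · simpa using ih (n + 1)

-- Characterization of A's fold over enumerate with arbitrary offset and initial state.
theorem foldA_char (s e : Int) (xs : List Int) (n : Int)
    (fd : List Int) (si ei : Option Int) :
    (PySem.List.enumerate xs n).foldl
      (fun (acc : List Int × Option Int × Option Int) (p : Int × Int) =>
        if p.2 ≥ s then
          if p.2 ≤ e then
            (acc.1 ++ [p.2],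
             (match acc.2.1 with | none => some p.1 | some v => some v),
             some p.1)
          else acc
        else acc)
      (fd, si, ei)
    = (fd ++ xs.filter (fun d => decide (s ≤ d ∧ d ≤ e)),
       si.or (firstInRangeAux s e (PySem.List.enumerate xs n)),
       (lastIdx s e xs n).or ei) := by
  induction xs generalizing n fd si ei with
  | nil => simp [PySem.List.enumerate, firstInRangeAux, lastIdx]
  | cons d ds ih =>
    rw [PySem.List.enumerate_cons]
    by_cases h1 : d ≥ s
    · by_cases h2 : d ≤ e
      · simp only [List.foldl_cons, if_pos h1, if_pos h2]
        rw [ih]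
        simp only [firstInRangeAux, lastIdx, if_pos (And.intro h1 h2), Prod.mk.injEq]
        refine ⟨by simp [h1, h2], ?_, ?_⟩
        · cases si <;> simp
        · cases lastIdx s e ds (n + 1) <;> simp
      · simp only [List.foldl_cons, if_pos h1, if_neg h2]
        rw [ih]
        have hp : ¬ (s ≤ d ∧ d ≤ e) := fun h => h2 h.2
        simp [firstInRangeAux, lastIdx, h2]
    · simp only [List.foldl_cons, if_neg h1]
      rw [ih]
      have hp : ¬ (s ≤ d ∧ d ≤ e) := fun h => h1 h.1
      simp [firstInRangeAux, lastIdx, h1]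

theorem lastIdx_mem_of_first (s e : Int) (xs : List Int)
    (h : firstInRangeAux s e (PySem.List.enumerate xs 0) ≠ none) :
    ∃ j, lastIdx s e xs 0 = some j := by
  cases hl : lastIdx s e xs 0 with
  | none => exact absurd ((first_none_iff_last_none s e xs 0).mpr hl) h
  | some j => exact ⟨j, rfl⟩

-- ===== VERDICT (by name: the statement is the Claim_ definition above) =====
theorem day_filter_spec : Claim_equal_day_filter := by
  intro days_ls iv_ls s e _
  unfold Spec_day_filter day_filter day_filter_alt firstInRange
  rw [foldA_char]
  simp only [Option.none_or, Option.or_none]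
  cases hf : firstInRangeAux s e (PySem.List.enumerate days_ls 0) with
  | none =>
    have hl : lastIdx s e days_ls 0 = none := (first_none_iff_last_none s e days_ls 0).mp hf
    rw [hl]
    simp
  | some lo =>
    obtain ⟨j, hj⟩ := lastIdx_mem_of_first s e days_ls (by simp [hf])
    have hrev := firstAux_rev s e days_ls
    rw [hj] at hrev
    simp only [hj, hrev, Option.map_some, Option.getD_some]
    have : (days_ls.length : Int) - 1 - ((days_ls.length : Int) - 1 - j) = j := by ring
    rw [this]
    simp
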